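-- pv_equiv track=rewrite | github.com/vllm-project/vllm | tools/ci/generate_test_deps.py | _find_matching_test_files
-- ===== SOURCE A (Python) =====
-- def _find_matching_test_files(
--     test_paths: set[str], all_test_files: set[str]
-- ) -> set[str]:
--     """Find test files that match the given paths (prefix match)."""
--     matches = set()
--     for test_path in test_paths:
--         for test_file in all_test_files:
--             if test_file.startswith(test_path) or test_file == test_path:
--                 matches.add(test_file)
--     return matches
-- ===== SOURCE B (Python) =====
-- def _find_matching_test_files(
--     test_paths: set[str], all_test_files: set[str]
-- ) -> set[str]:
--     """Find test files that match the given paths (prefix match).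
--
--     Keeps a shrinking pool of still-unmatched files: each file is only
--     scanned until the first path that matches it, then leaves the pool.
--     """
--     matches = set()
--     remaining = list(all_test_files)
--     for test_path in test_paths:
--         still_unmatched = []
--         for test_file in remaining:
--             if test_file.startswith(test_path):
--                 matches.add(test_file)
--             else:
--                 still_unmatched.append(test_file)
--         remaining = still_unmatched
--     return matches
-- ===== Notes on version B (the rewrite author's own statement) =====
-- stated objective: faster
-- what changed: Instead of re-scanning the full file set for every path, B keeps a shrinking pool of still-unmatched files: a file is scanned only until the first path that matches it and then leaves the pool, so matched files are never compared against the remaining paths.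
import Mathlib
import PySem

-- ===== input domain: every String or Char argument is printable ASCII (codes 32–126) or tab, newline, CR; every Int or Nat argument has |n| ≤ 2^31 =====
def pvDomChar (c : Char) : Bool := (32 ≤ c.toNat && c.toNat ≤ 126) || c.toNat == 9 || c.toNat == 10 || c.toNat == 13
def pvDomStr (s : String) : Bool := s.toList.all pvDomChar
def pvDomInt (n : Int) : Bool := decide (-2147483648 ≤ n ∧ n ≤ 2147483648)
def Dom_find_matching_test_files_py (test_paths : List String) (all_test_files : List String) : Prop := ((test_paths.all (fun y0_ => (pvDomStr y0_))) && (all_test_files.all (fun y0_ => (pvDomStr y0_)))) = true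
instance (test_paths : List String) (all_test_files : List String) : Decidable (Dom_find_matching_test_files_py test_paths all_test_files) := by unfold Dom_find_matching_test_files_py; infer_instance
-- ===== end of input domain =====

-- B keeps a shrinking pool of still-unmatched files (each file is scanned only until
-- its first matching path) instead of re-scanning the whole file set for every path.

-- ===== PORT A =====
def find_matching_test_files_py (test_paths : List String) (all_test_files : List String) : List String :=
  test_paths.foldl (fun matched test_path =>
    all_test_files.foldl (fun matched test_file =>
      if PySem.Str.startswith test_file test_path || test_file == test_path then
        PySem.Set.add matched test_file
      else matched) matched)
    (PySem.Set.empty : PySem.Set String)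

-- ===== PORT B =====
def find_matching_test_files_py_alt (test_paths : List String) (all_test_files : List String) : List String :=
  (test_paths.foldl (fun (st : PySem.Set String × List String) test_path =>
      st.2.foldl (fun (st2 : PySem.Set String × List String) test_file =>
        if PySem.Str.startswith test_file test_path then
          (PySem.Set.add st2.1 test_file, st2.2)
        else (st2.1, st2.2 ++ [test_file]))
        (st.1, ([] : List String)))
    ((PySem.Set.empty : PySem.Set String), all_test_files)).1

-- ===== PRECONDITION & SPEC =====
def Spec_find_matching_test_files_py (test_paths : List String) (all_test_files : List String) (out : List String) : Prop := out = find_matching_test_files_py_alt test_paths all_test_files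
instance (test_paths : List String) (all_test_files : List String) (out : List String) : Decidable (Spec_find_matching_test_files_py test_paths all_test_files out) := by unfold Spec_find_matching_test_files_py; infer_instance

-- ===== CLAIM (what is proved, stated in full; the proofs are below) =====
def Claim_equal_find_matching_test_files_py : Prop := ∀ (test_paths : List String) (all_test_files : List String), Dom_find_matching_test_files_py test_paths all_test_files → Spec_find_matching_test_files_py test_paths all_test_files (find_matching_test_files_py test_paths all_test_files)

-- ===== LEMMAS AND PROOFS =====

-- 'f.startswith(p) or f == p' is just 'f.startswith(p)'
theorem pv_cond_eq (p f : String) :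
    (PySem.Str.startswith f p || f == p) = PySem.Str.startswith f p := by
  cases h : f == p with
  | false => simp
  | true =>
    have : f = p := by simpa using h
    subst this
    simp [PySem.Str.startswith_eq, PySem.Chars.startswith_iff]

-- A's inner loop over the full file list is a Set.update with the matching files
theorem pv_inner_A (p : String) (files : List String) (s : PySem.Set String) :
    files.foldl (fun matched test_file =>
      if PySem.Str.startswith test_file p || test_file == p then
        PySem.Set.add matched test_file
      else matched) s
    = PySem.Set.update s (files.filter (fun f => PySem.Str.startswith f p)) := by
  have hfun : (fun (matched : PySem.Set String) test_file =>
      if PySem.Str.startswith test_file p || test_file == p then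
        PySem.Set.add matched test_file
      else matched)
      = (fun (matched : PySem.Set String) test_file =>
      if PySem.Str.startswith test_file p then
        PySem.Set.add matched test_file
      else matched) := by
    funext m f
    rw [pv_cond_eq]
  rw [hfun]
  induction files generalizing s with
  | nil => rfl
  | cons f fs ih =>
    simp only [List.foldl_cons, List.filter_cons]
    cases h : PySem.Str.startswith f p with
    | false =>
      simp only [Bool.false_eq_true, if_false]
      exact ih s
    | true =>
      simp only [if_true]
      rw [PySem.Set.update_cons]
      exact ih (PySem.Set.add s f)

-- B's inner loop updates the match set with the matching files and collects the rest
theorem pv_inner_B (p : String) (rem : List String) (s : PySem.Set String) (acc : List String) :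
    rem.foldl (fun (st2 : PySem.Set String × List String) test_file =>
        if PySem.Str.startswith test_file p then
          (PySem.Set.add st2.1 test_file, st2.2)
        else (st2.1, st2.2 ++ [test_file])) (s, acc)
    = (PySem.Set.update s (rem.filter (fun f => PySem.Str.startswith f p)),
       acc ++ rem.filter (fun f => !PySem.Str.startswith f p)) := by
  induction rem generalizing s acc with
  | nil => simp [PySem.Set.update_nil]
  | cons f fs ih =>
    simp only [List.foldl_cons, List.filter_cons]
    cases h : PySem.Str.startswith f p with
    | false =>
      simp only [Bool.false_eq_true, if_false, Bool.not_false, if_true]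
      rw [ih]
      simp [List.append_assoc]
    | true =>
      simp only [if_true, Bool.not_true, Bool.false_eq_true, if_false]
      rw [ih, PySem.Set.update_cons]

-- the ports as folds of their per-path effect
theorem pv_portA_eq (tp files : List String) :
    find_matching_test_files_py tp files
    = tp.foldl (fun s p =>
        PySem.Set.update s (files.filter (fun f => PySem.Str.startswith f p)))
        (PySem.Set.empty : PySem.Set String) := by
  unfold find_matching_test_files_py
  congr 1
  funext s p
  exact pv_inner_A p files s

theorem pv_portB_eq (tp files : List String) :
    find_matching_test_files_py_alt tp files
    = (tp.foldl (fun (st : PySem.Set String × List String) p =>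
        (PySem.Set.update st.1 (st.2.filter (fun f => PySem.Str.startswith f p)),
         st.2.filter (fun f => !PySem.Str.startswith f p)))
        ((PySem.Set.empty : PySem.Set String), files)).1 := by
  unfold find_matching_test_files_py_alt
  congr 2
  funext st p
  rw [pv_inner_B p st.2 st.1 []]
  simp

-- updating with elements already in the set is a no-op: they may be filtered away
theorem pv_drop (l : List String) (s : PySem.Set String) (q : String → Bool)
    (h : ∀ x ∈ l, q x = false → x ∈ s) :
    PySem.Set.update s l = PySem.Set.update s (l.filter q) := by
  induction l generalizing s with
  | nil => rfl
  | cons x xs ih =>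
    simp only [List.filter_cons]
    cases hq : q x with
    | false =>
      have hx : x ∈ s := h x (by simp) hq
      simp only [Bool.false_eq_true, if_false, PySem.Set.update_cons,
        PySem.Set.add_of_mem hx]
      exact ih s (fun y hy hqy => h y (by simp [hy]) hqy)
    | true =>
      simp only [if_true, PySem.Set.update_cons]
      exact ih (PySem.Set.add s x)
        (fun y hy hqy => (PySem.Set.mem_add _ _ _).2 (Or.inl (h y (by simp [hy]) hqy)))

-- main invariant: A's per-path update over the full file list equals B's per-path
-- update over the still-unmatched files
theorem pv_main (ps : List String) (files : List String) (s : PySem.Set String) :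
    ps.foldl (fun s p =>
        PySem.Set.update s (files.filter (fun f => PySem.Str.startswith f p))) s
    = (ps.foldl (fun (st : PySem.Set String × List String) p =>
        (PySem.Set.update st.1 (st.2.filter (fun f => PySem.Str.startswith f p)),
         st.2.filter (fun f => !PySem.Str.startswith f p)))
        (s, files.filter (fun f => !PySem.Set.contains s f))).1 := by
  induction ps generalizing s with
  | nil => rfl
  | cons p ps ih =>
    simp only [List.foldl_cons]
    have claim1 :
        PySem.Set.update s ((files.filter (fun f => !PySem.Set.contains s f)).filter
            (fun f => PySem.Str.startswith f p))
        = PySem.Set.update s (files.filter (fun f => PySem.Str.startswith f p)) := by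
      rw [List.filter_comm]
      exact (pv_drop _ s _ (by
        intro x hx hqx
        simp only [Bool.not_eq_false'] at hqx
        exact (PySem.Set.contains_iff s x).1 hqx)).symm
    have claim2 :
        (files.filter (fun f => !PySem.Set.contains s f)).filter
            (fun f => !PySem.Str.startswith f p)
        = files.filter (fun f => !PySem.Set.contains
            (PySem.Set.update s (files.filter (fun g => PySem.Str.startswith g p))) f) := by
      rw [List.filter_filter]
      apply List.filter_congr
      intro f hf
      by_cases hm : PySem.Chars.startswith f.toList p.toList = true
      · by_cases hs : f ∈ s <;>
          simp [PySem.Set.mem_update, List.mem_filter, hm, hf, hs]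
      · have hm' : PySem.Chars.startswith f.toList p.toList = false := by simpa using hm
        by_cases hs : f ∈ s <;>
          simp [PySem.Set.mem_update, List.mem_filter, hm', hf, hs]
    rw [claim1, claim2]
    exact ih (PySem.Set.update s (files.filter (fun f => PySem.Str.startswith f p)))

-- ===== VERDICT (by name: the statement is the Claim_ definition above) =====
theorem find_matching_test_files_py_spec : Claim_equal_find_matching_test_files_py := by
  intro test_paths all_test_files _
  unfold Spec_find_matching_test_files_py
  rw [pv_portA_eq, pv_portB_eq, pv_main]
  congr 2
  simp [PySem.Set.empty, PySem.Set.contains]
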